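-- pv_equiv track=rewrite | github.com/han-hyeonmin/LLMServingSim | serving/core/radix_tree.py | _key_match_paged
-- ===== SOURCE A (Python) =====
-- from typing import TYPE_CHECKING, List, Optional, NamedTuple, Any
--
-- def _key_match_paged(key0: List, key1: List, page_size: int):
--     min_len = min(len(key0), len(key1))
--
--     i = 0
--     while i + page_size <= min_len:
--         if key0[i : i + page_size] != key1[i : i + page_size]:
--             break
--         i += page_size
--
--     rem = min_len - i
--     if rem and (len(key0) == len(key1)) and (key0[i:i+rem] == key1[i:i+rem]):
--         i += rem
--
--     return i
-- ===== SOURCE B (Python) =====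
-- def _key_match_paged(key0, key1, page_size):
--     L = 0
--     for x, y in zip(key0, key1):
--         if x != y:
--             break
--         L += 1
--     if L == len(key0) == len(key1):
--         return L
--     return (L // page_size) * page_size
-- ===== Notes on version B (the rewrite author's own statement) =====
-- stated objective: simpler
-- what changed: B replaces A's page-chunk slicing loop and tail-reconstruction branch with one element-wise scan computing the common-prefix length L, returning L when both lists are fully equal and (L // page_size) * page_size otherwise.
-- outside the precondition, e.g. on _key_match_paged([1, 2, 9], [1, 3, 9], -1): A returns 0, B returns 1
import Mathlib
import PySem

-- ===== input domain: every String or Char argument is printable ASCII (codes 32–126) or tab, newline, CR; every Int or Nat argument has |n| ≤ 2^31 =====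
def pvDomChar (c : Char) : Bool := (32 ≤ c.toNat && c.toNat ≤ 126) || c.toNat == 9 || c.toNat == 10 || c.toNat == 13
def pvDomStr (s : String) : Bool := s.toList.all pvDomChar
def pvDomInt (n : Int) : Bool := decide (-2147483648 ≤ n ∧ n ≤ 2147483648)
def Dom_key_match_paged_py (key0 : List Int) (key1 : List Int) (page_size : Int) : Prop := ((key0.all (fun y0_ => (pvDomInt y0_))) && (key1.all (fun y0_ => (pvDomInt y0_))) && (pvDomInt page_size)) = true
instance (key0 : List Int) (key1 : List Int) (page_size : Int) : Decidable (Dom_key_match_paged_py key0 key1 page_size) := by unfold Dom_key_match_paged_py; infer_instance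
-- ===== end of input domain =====

-- B: one element-wise common-prefix scan plus closed-form page arithmetic instead of
-- A's page-chunk slicing loop and tail-reconstruction branch (objective: simpler).

-- ===== PORT A =====
-- the while loop, fuel-driven; with page_size ≥ 1 the supplied fuel (min_len + 1) always suffices
def kmpLoop (key0 key1 : List Int) (ps ml : Int) : Int → Nat → Int
  | i, 0 => i
  | i, fuel + 1 =>
    if i + ps ≤ ml then
      if PySem.List.slice key0 (some i) (some (i + ps)) ≠ PySem.List.slice key1 (some i) (some (i + ps)) then i
      else kmpLoop key0 key1 ps ml (i + ps) fuel
    else i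

def key_match_paged_py (key0 : List Int) (key1 : List Int) (page_size : Int) : Int :=
  let ml : Int := min (key0.length : Int) (key1.length : Int)
  let i := kmpLoop key0 key1 page_size ml 0 (ml.toNat + 1)
  let rem := ml - i
  if rem ≠ 0 ∧ (key0.length : Int) = (key1.length : Int) ∧
      PySem.List.slice key0 (some i) (some (i + rem)) = PySem.List.slice key1 (some i) (some (i + rem))
  then i + rem else i

-- ===== PORT B =====
-- element-wise common-prefix length (B's zip loop with break)
def cpl : List Int → List Int → Int
  | x :: xs, y :: ys => if x = y then 1 + cpl xs ys else 0
  | _, _ => 0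

def key_match_paged_py_alt (key0 : List Int) (key1 : List Int) (page_size : Int) : Int :=
  let L := cpl key0 key1
  if L = (key0.length : Int) ∧ (key0.length : Int) = (key1.length : Int) then L
  else PySem.Int.floordiv L page_size * page_size

-- ===== PRECONDITION & SPEC =====
-- Pre_ excludes page_size ≤ 0: there A's while loop usually never terminates (always at page_size = 0), and when a
-- negative page_size makes it return at all, the value is an accident of Python's negative-slice clamping.
def Pre_key_match_paged_py (key0 : List Int) (key1 : List Int) (page_size : Int) : Prop := 1 ≤ page_size
instance (key0 : List Int) (key1 : List Int) (page_size : Int) : Decidable (Pre_key_match_paged_py key0 key1 page_size) := by unfold Pre_key_match_paged_py; infer_instance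
def pvWitness_key_match_paged_py : List Int × List Int × Int := ([1, 2, 3], [1, 2, 4], 2)

def Spec_key_match_paged_py (key0 : List Int) (key1 : List Int) (page_size : Int) (out : Int) : Prop := out = key_match_paged_py_alt key0 key1 page_size
instance (key0 : List Int) (key1 : List Int) (page_size : Int) (out : Int) : Decidable (Spec_key_match_paged_py key0 key1 page_size out) := by unfold Spec_key_match_paged_py; infer_instance

-- ===== CLAIM (what is proved, stated in full; the proofs are below) =====
def Claim_equal_key_match_paged_py : Prop := ∀ (key0 : List Int) (key1 : List Int) (page_size : Int), Dom_key_match_paged_py key0 key1 page_size → Pre_key_match_paged_py key0 key1 page_size → Spec_key_match_paged_py key0 key1 page_size (key_match_paged_py key0 key1 page_size)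

-- ===== LEMMAS AND PROOFS =====

theorem cpl_nonneg : ∀ (xs ys : List Int), 0 ≤ cpl xs ys := by
  intro xs
  induction xs with
  | nil => intro ys; cases ys <;> simp [cpl]
  | cons x xs ih =>
    intro ys; cases ys with
    | nil => simp [cpl]
    | cons y ys =>
      simp only [cpl]; split_ifs
      · have := ih ys; omega
      · omega

theorem cpl_le_left : ∀ (xs ys : List Int), cpl xs ys ≤ (xs.length : Int) := by
  intro xs
  induction xs with
  | nil => intro ys; cases ys <;> simp [cpl]
  | cons x xs ih =>
    intro ys; cases ys with
    | nil => simp [cpl]; positivity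
    | cons y ys =>
      simp only [cpl, List.length_cons]; split_ifs
      · have := ih ys; push_cast; omega
      · positivity

theorem cpl_le_right : ∀ (xs ys : List Int), cpl xs ys ≤ (ys.length : Int) := by
  intro xs
  induction xs with
  | nil => intro ys; cases ys <;> simp [cpl] <;> positivity
  | cons x xs ih =>
    intro ys; cases ys with
    | nil => simp [cpl]
    | cons y ys =>
      simp only [cpl, List.length_cons]; split_ifs
      · have := ih ys; push_cast; omega
      · positivity

theorem cpl_take_iff : ∀ (xs ys : List Int) (n : ℕ), n ≤ xs.length → n ≤ ys.length →
    (xs.take n = ys.take n ↔ (n : Int) ≤ cpl xs ys) := by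
  intro xs
  induction xs with
  | nil =>
    intro ys n h0 _
    simp only [List.length_nil] at h0
    have hn : n = 0 := by omega
    subst hn
    simp [cpl_nonneg]
  | cons x xs ih =>
    intro ys n h0 h1
    cases ys with
    | nil =>
      simp only [List.length_nil] at h1
      have hn : n = 0 := by omega
      subst hn
      simp [cpl_nonneg]
    | cons y ys =>
      cases n with
      | zero => simp [cpl_nonneg]
      | succ n =>
        simp only [List.take_succ_cons, List.cons.injEq, cpl]
        split_ifs with hxy
        · subst hxy
          have := ih ys n (by simpa using h0) (by simpa using h1)
          constructor
          · rintro ⟨-, h⟩; have := this.mp h; push_cast; omega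
          · intro h; refine ⟨rfl, this.mpr ?_⟩; push_cast at h ⊢; omega
        · constructor
          · rintro ⟨h, -⟩; exact absurd h hxy
          · intro h; exfalso; push_cast at h; omega

-- chunk-extension: equal prefixes of length a extend by equal windows
theorem take_add_eq_iff {xs ys : List Int} {a d : ℕ} (h : xs.take a = ys.take a) :
    ((xs.drop a).take d = (ys.drop a).take d ↔ xs.take (a + d) = ys.take (a + d)) := by
  constructor
  · intro h2; rw [List.take_add, List.take_add, h, h2]
  · intro h2
    rw [List.take_add, List.take_add, h] at h2
    exact List.append_cancel_left h2

-- slice window as drop/take, for 0 ≤ i and 0 ≤ d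
theorem slice_window (xs : List Int) (i d : Int) (hi : 0 ≤ i) (hd : 0 ≤ d) :
    PySem.List.slice xs (some i) (some (i + d)) = (xs.drop i.toNat).take d.toNat := by
  rw [PySem.List.slice_toNat xs hi (by omega)]
  congr 1
  omega

theorem loop_eq (key0 key1 : List Int) (ps : Int) (hps : 1 ≤ ps) :
    ∀ (fuel : ℕ) (i k : Int), i = ps * k → 0 ≤ i → i ≤ cpl key0 key1 →
      min (key0.length : Int) (key1.length : Int) < i + (fuel : Int) * ps →
      kmpLoop key0 key1 ps (min (key0.length : Int) (key1.length : Int)) i fuel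
        = ps * (cpl key0 key1 / ps) := by
  intro fuel
  induction fuel with
  | zero =>
    intro i k hik hi hiL hml
    exfalso
    have h0 := cpl_le_left key0 key1
    have h1 := cpl_le_right key0 key1
    simp only [Nat.cast_zero, zero_mul, add_zero] at hml
    omega
  | succ fuel ih =>
    intro i k hik hi hiL hml
    set L := cpl key0 key1 with hL
    have hL0 : 0 ≤ L := cpl_nonneg key0 key1
    have hLl : L ≤ (key0.length : Int) := cpl_le_left key0 key1
    have hLr : L ≤ (key1.length : Int) := cpl_le_right key0 key1
    set ml := min (key0.length : Int) (key1.length : Int) with hml'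
    have hLml : L ≤ ml := le_min hLl hLr
    -- equal prefixes of length i
    have htake : key0.take i.toNat = key1.take i.toNat := by
      refine (cpl_take_iff key0 key1 i.toNat (by omega) (by omega)).mpr ?_
      omega
    simp only [kmpLoop]
    split_ifs with hcond hne
    · -- slices unequal: break, result i; show L < i + ps so i = ps * (L / ps)
      have hne' : ¬ key0.take (i.toNat + ps.toNat) = key1.take (i.toNat + ps.toNat) := by
        intro hEq
        apply hne
        rw [slice_window key0 i ps hi (by omega), slice_window key1 i ps hi (by omega)]
        exact (take_add_eq_iff htake).mpr hEq
      have hlt : L < i + ps := by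
        by_contra hge
        push_neg at hge
        exact hne' ((cpl_take_iff key0 key1 (i.toNat + ps.toNat) (by push_cast; omega)
          (by push_cast; omega)).mpr (by push_cast; omega))
      -- i ≤ L < i + ps, i = ps * k ⇒ L / ps = k
      have hk1 : k ≤ L / ps := by
        rw [Int.le_ediv_iff_mul_le (by omega)]; rw [mul_comm]; omega
      have hk2 : L / ps < k + 1 := by
        rw [Int.ediv_lt_iff_lt_mul (by omega)]
        calc L < i + ps := hlt
        _ = (k + 1) * ps := by rw [hik]; ring
      have : L / ps = k := by omega
      rw [this, ← hik]
    · -- slices equal: continue with i + ps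
      have hEq : key0.take (i.toNat + ps.toNat) = key1.take (i.toNat + ps.toNat) := by
        simp only [not_not] at hne
        rw [slice_window key0 i ps hi (by omega), slice_window key1 i ps hi (by omega)] at hne
        exact (take_add_eq_iff htake).mp hne
      have hle : i + ps ≤ L := by
        have := (cpl_take_iff key0 key1 (i.toNat + ps.toNat) (by push_cast; omega)
          (by push_cast; omega)).mp hEq
        push_cast at this; omega
      refine ih (i + ps) (k + 1) (by rw [hik]; ring) (by omega) hle ?_
      have : i + ps + (fuel : Int) * ps = i + ((fuel : Int) + 1) * ps := by ring
      rw [this]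
      push_cast at hml ⊢
      exact hml
    · -- loop condition false: ml < i + ps, result i; L ≤ ml < i + ps, same division argument
      push_neg at hcond
      have hk1 : k ≤ L / ps := by
        rw [Int.le_ediv_iff_mul_le (by omega)]; rw [mul_comm]; omega
      have hk2 : L / ps < k + 1 := by
        rw [Int.ediv_lt_iff_lt_mul (by omega)]
        have : L < i + ps := by omega
        calc L < i + ps := this
        _ = (k + 1) * ps := by rw [hik]; ring
      have : L / ps = k := by omega
      rw [this, ← hik]

-- ===== VERDICT (by name: the statement is the Claim_ definition above) =====
theorem key_match_paged_py_spec : Claim_equal_key_match_paged_py := by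
  intro key0 key1 ps _ hps
  unfold Spec_key_match_paged_py key_match_paged_py key_match_paged_py_alt
  have hps' : (1 : Int) ≤ ps := hps
  set L := cpl key0 key1 with hL
  have hL0 : 0 ≤ L := cpl_nonneg key0 key1
  have hLl : L ≤ (key0.length : Int) := cpl_le_left key0 key1
  have hLr : L ≤ (key1.length : Int) := cpl_le_right key0 key1
  set ml := min (key0.length : Int) (key1.length : Int) with hml
  have hml0 : 0 ≤ ml := by positivity
  have hLml : L ≤ ml := le_min hLl hLr
  have hfd : PySem.Int.floordiv L ps = L / ps := PySem.Int.floordiv_eq_ediv_of_pos (by omega)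
  have hloop : kmpLoop key0 key1 ps ml 0 (ml.toNat + 1) = ps * (L / ps) := by
    refine loop_eq key0 key1 ps hps' (ml.toNat + 1) 0 0 (by ring) le_rfl hL0 ?_
    have h1 : ml < ((ml.toNat : Int) + 1) * 1 := by push_cast; omega
    calc ml < ((ml.toNat : Int) + 1) * 1 := h1
      _ ≤ ((ml.toNat : Int) + 1) * ps := by
          exact mul_le_mul_of_nonneg_left hps' (by positivity)
      _ = 0 + (((ml.toNat + 1 : ℕ) : Int)) * ps := by push_cast; ring
  simp only [hloop, hfd]
  set F := ps * (L / ps) with hF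
  have hF0 : 0 ≤ F := by
    have : 0 ≤ L / ps := Int.ediv_nonneg hL0 (by omega)
    positivity
  have hFle : F ≤ L := by
    have := Int.emod_nonneg L (show ps ≠ 0 by omega)
    have := Int.ediv_add_emod L ps
    omega
  have htakeF : key0.take F.toNat = key1.take F.toNat := by
    refine (cpl_take_iff key0 key1 F.toNat (by omega) (by omega)).mpr (by omega)
  by_cases hB : L = (key0.length : Int) ∧ (key0.length : Int) = (key1.length : Int)
  · -- B returns L; then L = ml and A's tail branch (or rem = 0) yields ml = L
    have hLeq : L = ml := by omega
    rw [if_pos hB]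
    by_cases hrem : ml - F = 0
    · rw [if_neg (by intro h; exact h.1 hrem)]
      omega
    · have hslice : PySem.List.slice key0 (some F) (some (F + (ml - F)))
          = PySem.List.slice key1 (some F) (some (F + (ml - F))) := by
        rw [slice_window key0 F (ml - F) hF0 (by omega),
            slice_window key1 F (ml - F) hF0 (by omega)]
        refine (take_add_eq_iff htakeF).mpr ?_
        refine (cpl_take_iff key0 key1 (F.toNat + (ml - F).toNat) (by omega) (by omega)).mpr ?_
        push_cast; omega
      rw [if_pos ⟨hrem, hB.2, hslice⟩]
      omega
  · -- B returns F; show A's tail branch does not fire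
    rw [if_neg hB]
    by_cases hrem : ml - F = 0
    · rw [if_neg (by intro h; exact h.1 hrem)]
      exact mul_comm ps (L / ps)
    · have hnot : ¬ ((ml - F ≠ 0) ∧ (key0.length : Int) = (key1.length : Int) ∧
          PySem.List.slice key0 (some F) (some (F + (ml - F)))
            = PySem.List.slice key1 (some F) (some (F + (ml - F)))) := by
        rintro ⟨-, hlen, hslice⟩
        -- lengths equal, so ml = both lengths; if the tails matched, L would be ml = length
        have hml_eq : ml = (key0.length : Int) := by omega
        have hLlt : L < ml := by
          rcases lt_or_eq_of_le hLml with h | h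
          · exact h
          · exact absurd ⟨by omega, hlen⟩ hB
        rw [slice_window key0 F (ml - F) hF0 (by omega),
            slice_window key1 F (ml - F) hF0 (by omega)] at hslice
        have hEq := (take_add_eq_iff htakeF).mp hslice
        have := (cpl_take_iff key0 key1 (F.toNat + (ml - F).toNat) (by omega) (by omega)).mp hEq
        push_cast at this
        omega
      rw [if_neg hnot]
      exact mul_comm ps (L / ps)
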